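-- pv_equiv track=rewrite | github.com/georgezav/Dopamine-and-movement | Code for replicating the corr paper.py | find_transition_indices
-- ===== SOURCE A (Python) =====
-- def find_transition_indices(track_of_indeces):
--     transition_indices = []
--     prev_value = None
--
--     for i, sublist in enumerate(track_of_indeces):
--         current_value = sublist[0]
--
--         if prev_value is not None and current_value != prev_value:
--             transition_indices.append(i)
--
--         prev_value = current_value
--
--     return transition_indices
-- ===== SOURCE B (Python) =====
-- def _run_end(t, start):
--     # index just past the maximal run of equal first values starting at `start`
--     v = t[start][0]
--     k = start + 1
--     while k < len(t) and t[k][0] == v: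
--         k += 1
--     return k
--
-- def find_transition_indices(track_of_indeces):
--     t = track_of_indeces
--     pos = _run_end(t, 0) if t else 0
--     out = []
--     while pos < len(t):
--         out.append(pos)
--         pos = _run_end(t, pos)
--     return out
-- ===== Notes on version B (the rewrite author's own statement) =====
-- stated objective: alternative
-- what changed: Run-jumping: a helper scans forward to the end of the maximal run of equal first values, and the outer loop hops from run start to run start collecting those start indices, instead of A's element-by-element prev-value comparison with per-index appends.
import Mathlib
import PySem

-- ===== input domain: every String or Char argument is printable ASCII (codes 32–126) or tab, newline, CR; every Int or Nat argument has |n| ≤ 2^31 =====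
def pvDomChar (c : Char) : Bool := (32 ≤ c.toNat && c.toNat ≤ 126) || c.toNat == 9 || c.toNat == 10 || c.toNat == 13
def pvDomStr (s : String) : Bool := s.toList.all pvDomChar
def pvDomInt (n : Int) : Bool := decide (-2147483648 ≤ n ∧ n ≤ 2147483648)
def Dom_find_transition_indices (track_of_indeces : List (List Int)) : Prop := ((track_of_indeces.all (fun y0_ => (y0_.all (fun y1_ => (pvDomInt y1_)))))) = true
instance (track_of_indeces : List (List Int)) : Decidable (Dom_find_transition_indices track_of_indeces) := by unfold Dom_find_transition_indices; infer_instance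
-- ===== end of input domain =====

-- B replaces A's element-by-element prev-value scan by run-jumping: a helper finds the end of
-- each maximal run of equal first values and the outer loop hops run to run, collecting run
-- start indices. Same O(n) cost ("alternative" objective, no speed claim).

-- ===== PORT A =====
-- sublist[0]: Python raises IndexError on an empty sublist; Pre_ excludes those, so the default is never used inside Pre_.
def pvHead (s : List Int) : Int := (PySem.List.pyGet? s 0).getD 0

def pvLoopA (i : Int) (prev : Option Int) : List (List Int) → List Int
  | [] => []
  | s :: rest =>
    let cur := pvHead s
    (match prev with
     | some p => if cur ≠ p then [i] else []
     | none => []) ++ pvLoopA (i + 1) (some cur) rest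

def find_transition_indices (track_of_indeces : List (List Int)) : List Int :=
  pvLoopA 0 none track_of_indeces

-- ===== PORT B =====
-- the `while k < len(t) and t[k][0] == v: k += 1` loop of _run_end; the Nat argument is only
-- a totality guard (fuel): with fuel = len(t) it never runs out, since k increases towards len(t)
def pvRunEndLoop (t : List (List Int)) (v : Int) : Nat → Int → Int
  | 0, k => k
  | fuel + 1, k =>
    if k < (t.length : Int) ∧ pvHead ((PySem.List.pyGet? t k).getD []) = v then
      pvRunEndLoop t v fuel (k + 1)
    else k

def pvRunEnd (t : List (List Int)) (start : Int) : Int :=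
  pvRunEndLoop t (pvHead ((PySem.List.pyGet? t start).getD [])) t.length (start + 1)

-- the `while pos < len(t): out.append(pos); pos = _run_end(t, pos)` loop; fuel = len(t) + 1
-- suffices since pos strictly increases
def pvOuter (t : List (List Int)) : Nat → Int → List Int
  | 0, _ => []
  | fuel + 1, pos =>
    if pos < (t.length : Int) then pos :: pvOuter t fuel (pvRunEnd t pos)
    else []

def find_transition_indices_alt (track_of_indeces : List (List Int)) : List Int :=
  pvOuter track_of_indeces (track_of_indeces.length + 1)
    (if track_of_indeces ≠ [] then pvRunEnd track_of_indeces 0 else 0)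

-- ===== PRECONDITION & SPEC =====
-- Pre_ excludes exactly the inputs on which Python A raises IndexError: those containing an empty sublist.
def Pre_find_transition_indices (track_of_indeces : List (List Int)) : Prop :=
  ∀ s ∈ track_of_indeces, s ≠ []
instance (track_of_indeces : List (List Int)) : Decidable (Pre_find_transition_indices track_of_indeces) := by unfold Pre_find_transition_indices; infer_instance
def pvWitness_find_transition_indices : List (List Int) := [[1], [1], [2]]

def Spec_find_transition_indices (track_of_indeces : List (List Int)) (out : List Int) : Prop := out = find_transition_indices_alt track_of_indeces
instance (track_of_indeces : List (List Int)) (out : List Int) : Decidable (Spec_find_transition_indices track_of_indeces out) := by unfold Spec_find_transition_indices; infer_instance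

-- ===== CLAIM (what is proved, stated in full; the proofs are below) =====
def Claim_equal_find_transition_indices : Prop := ∀ (track_of_indeces : List (List Int)), Dom_find_transition_indices track_of_indeces → Pre_find_transition_indices track_of_indeces → Spec_find_transition_indices track_of_indeces (find_transition_indices track_of_indeces)

-- ===== LEMMAS AND PROOFS =====

-- length of the maximal prefix of l whose heads equal v
def natRun (v : Int) : List (List Int) → Nat
  | [] => 0
  | s :: r => if pvHead s = v then natRun v r + 1 else 0

theorem natRun_le (v : Int) (l : List (List Int)) : natRun v l ≤ l.length := by
  induction l with
  | nil => simp [natRun]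
  | cons s r ih => simp only [natRun, List.length_cons]; split <;> omega

-- characterization of the inner while loop at a Nat index, given enough fuel
theorem pvRunEndLoop_eq (t : List (List Int)) (v : Int) : ∀ (fuel k : Nat),
    t.length ≤ fuel + k →
    pvRunEndLoop t v fuel (k : Int) = (k : Int) + (natRun v (t.drop k) : Int) := by
  intro fuel
  induction fuel with
  | zero =>
    intro k hk
    have : t.drop k = [] := List.drop_eq_nil_of_le (by omega)
    simp [pvRunEndLoop, this, natRun]
  | succ fuel ih =>
    intro k hk
    by_cases hklt : k < t.length
    · have hd : t.drop k = t[k] :: t.drop (k + 1) := List.drop_eq_getElem_cons hklt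
      have hg : PySem.List.pyGet? t (k : Int) = some t[k] := by
        simp [PySem.List.pyGet?_natCast, List.getElem?_eq_getElem hklt]
      by_cases hv : pvHead t[k] = v
      · have hcond : (k : Int) < (t.length : Int) ∧ pvHead ((PySem.List.pyGet? t (k : Int)).getD []) = v := by
          refine ⟨by exact_mod_cast hklt, ?_⟩
          rw [hg]; exact hv
        rw [pvRunEndLoop, if_pos hcond]
        have hc : ((k : Int) + 1) = ((k + 1 : Nat) : Int) := by push_cast; ring
        rw [hc, ih (k + 1) (by omega)]
        rw [hd]; simp only [natRun, hv, if_pos]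
        push_cast; ring
      · have hcond : ¬ ((k : Int) < (t.length : Int) ∧ pvHead ((PySem.List.pyGet? t (k : Int)).getD []) = v) := by
          intro hc; rw [hg] at hc; exact hv hc.2
        rw [pvRunEndLoop, if_neg hcond, hd]; simp [natRun, hv]
    · have hd : t.drop k = [] := List.drop_eq_nil_of_le (by omega)
      have hcond : ¬ ((k : Int) < (t.length : Int) ∧ pvHead ((PySem.List.pyGet? t (k : Int)).getD []) = v) := by
        intro hc; omega
      rw [pvRunEndLoop, if_neg hcond, hd]; simp [natRun]

-- A's loop, decomposed along the first run
theorem pvLoopA_run (v : Int) (l : List (List Int)) : ∀ n : Int,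
    pvLoopA n (some v) l =
      match l.drop (natRun v l) with
      | [] => []
      | s' :: r' => (n + (natRun v l : Int)) :: pvLoopA (n + (natRun v l : Int) + 1) (some (pvHead s')) r' := by
  induction l with
  | nil => intro n; simp [pvLoopA, natRun]
  | cons s r ih =>
    intro n
    by_cases hv : pvHead s = v
    · have hnr : natRun v (s :: r) = natRun v r + 1 := by simp [natRun, hv]
      have hL : pvLoopA n (some v) (s :: r) = pvLoopA (n + 1) (some v) r := by
        simp [pvLoopA, hv]
      rw [hnr, hL, ih (n + 1)]
      simp only [List.drop_succ_cons]
      cases hd : r.drop (natRun v r) with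
      | nil => simp
      | cons s' r' =>
        simp only []
        have e1 : n + 1 + (natRun v r : Int) = n + ((natRun v r + 1 : Nat) : Int) := by
          push_cast; ring
        rw [e1]
    · have hnr : natRun v (s :: r) = 0 := by simp [natRun, hv]
      rw [hnr]
      simp only [List.drop_zero, Nat.cast_zero, add_zero]
      simp [pvLoopA, hv]

-- if the whole list is one run, A's loop emits nothing
-- (covered by pvLoopA_run's nil case)

-- the core correspondence: A's loop from offset k over the suffix t.drop k equals
-- B's outer run-jumping loop started at the end of the current run
theorem pvCore (t : List (List Int)) : ∀ (l : List (List Int)) (fuel k : Nat) (v : Int),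
    t.drop k = l → l.length < fuel →
    pvLoopA (k : Int) (some v) l = pvOuter t fuel ((k : Int) + (natRun v l : Int)) := by
  intro l
  induction h : l.length using Nat.strong_induction_on generalizing l with
  | _ m ih =>
    intro fuel k v hdrop hfuel
    obtain ⟨fuel', rfl⟩ : ∃ fuel', fuel = fuel' + 1 := ⟨fuel - 1, by omega⟩
    have hlen : natRun v l ≤ l.length := natRun_le v l
    have hlen2 : l.length + k ≥ t.length := by
      have := List.length_drop (l := t) (i := k); rw [hdrop] at this; omega
    rw [pvLoopA_run]
    cases hd : l.drop (natRun v l) with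
    | nil =>
      have hj : natRun v l = l.length := by
        have := List.length_drop (l := l) (i := natRun v l); rw [hd] at this; simp at this; omega
      rw [pvOuter, if_neg (by omega)]
    | cons s' r' =>
      simp only []
      have hdd : t.drop (k + natRun v l) = s' :: r' := by
        rw [← List.drop_drop, hdrop, hd]
      have hklt : k + natRun v l < t.length := by
        by_contra hc
        rw [List.drop_eq_nil_of_le (by omega)] at hdd
        simp at hdd
      rw [pvOuter, if_pos (by omega)]
      have hget : PySem.List.pyGet? t ((k : Int) + (natRun v l : Int)) = some s' := by
        have hc : ((k : Int) + (natRun v l : Int)) = ((k + natRun v l : Nat) : Int) := by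
          push_cast; ring
        rw [hc, PySem.List.pyGet?_natCast, List.getElem?_eq_getElem hklt]
        have hcons : t[k + natRun v l] :: t.drop (k + natRun v l + 1) = s' :: r' := by
          rw [← List.drop_eq_getElem_cons hklt, hdd]
        exact congrArg some (List.head_eq_of_cons_eq hcons)
      have hr' : t.drop (k + natRun v l + 1) = r' := by
        have hcons : t[k + natRun v l] :: t.drop (k + natRun v l + 1) = s' :: r' := by
          rw [← List.drop_eq_getElem_cons hklt, hdd]
        exact List.tail_eq_of_cons_eq hcons
      have hlr' : r'.length < m := by
        have := List.length_drop (l := l) (i := natRun v l); rw [hd] at this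
        simp at this; omega
      have hrec := ih r'.length (by omega) r' rfl fuel' (k + natRun v l + 1) (pvHead s') hr'
        (by omega)
      have hcast : (k : Int) + (natRun v l : Int) + 1 = ((k + natRun v l + 1 : Nat) : Int) := by
        push_cast; ring
      congr 1
      unfold pvRunEnd
      rw [hget]
      simp only [Option.getD_some]
      rw [hcast, pvRunEndLoop_eq t (pvHead s') t.length (k + natRun v l + 1) (by omega), hr']
      exact hrec

-- ===== VERDICT (by name: the statement is the Claim_ definition above) =====
theorem find_transition_indices_spec : Claim_equal_find_transition_indices := by
  intro t _ _
  unfold Spec_find_transition_indices find_transition_indices find_transition_indices_alt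
  cases t with
  | nil => simp [pvLoopA, pvOuter]
  | cons s rest =>
    rw [if_pos (by simp)]
    have h0 : pvLoopA 0 none (s :: rest) = pvLoopA 1 (some (pvHead s)) rest := by
      simp [pvLoopA]
    rw [h0]
    have hre : pvRunEnd (s :: rest) 0 = (1 : Int) + (natRun (pvHead s) rest : Int) := by
      unfold pvRunEnd
      have hg : PySem.List.pyGet? (s :: rest) (0 : Int) = some s := by simp
      rw [hg]
      simp only [Option.getD_some]
      have hc : (0 : Int) + 1 = ((1 : Nat) : Int) := by norm_num
      rw [hc, pvRunEndLoop_eq (s :: rest) (pvHead s) (s :: rest).length 1 (by simp)]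
      simp
    rw [hre]
    have := pvCore (s :: rest) rest ((s :: rest).length + 1) 1 (pvHead s) (by simp)
      (by simp)
    simpa using this
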